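-- pv_equiv track=rewrite | github.com/Kode-Rex/tddbuddy-reference-katas | url-parts/python/src/url_parts/url_parts.py | _split_host
-- ===== SOURCE A (Python) =====
-- TOP_LEVEL_DOMAINS = (".com", ".net", ".org", ".int", ".edu", ".gov", ".mil")
--
-- def _split_host(host_part: str) -> tuple[str, str]:
--     if host_part == "localhost":
--         return "", "localhost"
--
--     for tld in TOP_LEVEL_DOMAINS:
--         if not host_part.endswith(tld):
--             continue
--
--         before_tld = host_part[: -len(tld)]
--         last_dot = before_tld.rfind(".")
--         if last_dot < 0:
--             return "", before_tld + tld
--         subdomain = before_tld[:last_dot]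
--         hostname = before_tld[last_dot + 1:]
--         return subdomain, hostname + tld
--
--     raise ValueError(f"Unrecognized host: {host_part}")
-- ===== SOURCE B (Python) =====
-- TLD_LABELS = frozenset({"com", "net", "org", "int", "edu", "gov", "mil"})
--
-- def _split_host(host_part: str) -> tuple[str, str]:
--     if host_part == "localhost":
--         return "", "localhost"
--     labels = host_part.split(".")
--     if len(labels) >= 2 and labels[-1] in TLD_LABELS:
--         return ".".join(labels[:-2]), labels[-2] + "." + labels[-1]
--     raise ValueError(f"Unrecognized host: {host_part}")
-- ===== Notes on version B (the rewrite author's own statement) =====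
-- stated objective: alternative
-- what changed: B tokenizes the host into dot-separated labels with str.split('.') and reassembles the answer from the label list (join of all but the last two labels, plus the last two labels), instead of A's suffix tests (endswith over the TLD tuple) and index arithmetic with rfind/slicing.
import Mathlib
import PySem

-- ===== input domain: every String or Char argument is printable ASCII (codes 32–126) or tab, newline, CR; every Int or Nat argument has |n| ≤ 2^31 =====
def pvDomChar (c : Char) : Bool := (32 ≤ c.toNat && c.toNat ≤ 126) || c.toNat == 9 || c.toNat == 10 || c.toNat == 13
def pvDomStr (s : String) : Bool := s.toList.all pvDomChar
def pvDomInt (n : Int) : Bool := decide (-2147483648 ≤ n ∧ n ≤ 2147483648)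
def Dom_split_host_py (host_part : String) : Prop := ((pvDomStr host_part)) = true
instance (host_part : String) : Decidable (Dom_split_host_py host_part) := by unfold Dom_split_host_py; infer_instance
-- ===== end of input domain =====

-- B tokenizes the host into dot-separated labels (split('.')) and reassembles the answer
-- from the label list, instead of A's endswith loop over TLD suffixes with rfind/slicing;
-- objective: alternative algorithm, same cost.


-- ===== PORT A =====
def pvTLDs : List String := [".com", ".net", ".org", ".int", ".edu", ".gov", ".mil"]

-- the 'for tld in TOP_LEVEL_DOMAINS' loop; the fall-through [] case is Python's
-- 'raise ValueError', excluded by Pre_split_host_py (the port returns ("", "") there)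
def pvALoop (host_part : String) : List String → String × String
  | [] => ("", "")
  | tld :: rest =>
    if PySem.Str.endswith host_part tld then
      let before_tld := PySem.Str.slice host_part none (some (-(PySem.Str.len tld : Int)))
      let last_dot := PySem.Str.rfind before_tld "."
      if last_dot < 0 then ("", before_tld ++ tld)
      else (PySem.Str.slice before_tld none (some last_dot),
            PySem.Str.slice before_tld (some (last_dot + 1)) none ++ tld)
    else pvALoop host_part rest

def split_host_py (host_part : String) : String × String :=
  if host_part = "localhost" then ("", "localhost")
  else pvALoop host_part pvTLDs

-- ===== PORT B =====
-- the frozenset TLD_LABELS of Source B (used only for membership)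
def pvTLDLabels : PySem.Set String :=
  PySem.Set.ofList ["com", "net", "org", "int", "edu", "gov", "mil"]

def split_host_py_alt (host_part : String) : String × String :=
  if host_part = "localhost" then ("", "localhost")
  else
    let labels := (PySem.Str.split? host_part ".").getD []   -- sep "." ≠ "": never none
    if 2 ≤ labels.length ∧ PySem.List.pyGetD labels (-1) "" ∈ pvTLDLabels then
      (PySem.Str.join "." (PySem.List.slice labels none (some (-2))),
       PySem.List.pyGetD labels (-2) "" ++ "." ++ PySem.List.pyGetD labels (-1) "")
    else ("", "")   -- Python raises ValueError here (same inputs as in A; outside Pre_)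

-- ===== PRECONDITION & SPEC =====
-- Pre_ excludes exactly the inputs on which the Python A raises ValueError: host_part is
-- neither "localhost" nor ends in one of the seven 4-character TLDs.
def Pre_split_host_py (host_part : String) : Prop :=
  host_part = "localhost" ∨ PySem.Str.slice host_part (some (-4)) none ∈ pvTLDs
instance (host_part : String) : Decidable (Pre_split_host_py host_part) := by
  unfold Pre_split_host_py; infer_instance

def pvWitness_split_host_py : String := "www.example.com"

def Spec_split_host_py (host_part : String) (out : String × String) : Prop := out = split_host_py_alt host_part
instance (host_part : String) (out : String × String) : Decidable (Spec_split_host_py host_part out) := by unfold Spec_split_host_py; infer_instance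

-- ===== CLAIM (what is proved, stated in full; the proofs are below) =====
def Claim_equal_split_host_py : Prop := ∀ (host_part : String), Dom_split_host_py host_part → Pre_split_host_py host_part → Spec_split_host_py host_part (split_host_py host_part)

-- ===== LEMMAS AND PROOFS =====

-- s.rpartition(".")-style split at the LAST dot (("", s) when there is no dot): the common
-- normal form both ports are reduced to in the proofs below (a proof-side helper only)
def pvRPartitionDot (s : String) : String × String :=
  let cs := s.toList
  let after := cs.reverse.takeWhile (· ≠ '.')
  if after.length = cs.length then ("", s)
  else (String.ofList (cs.take (cs.length - after.length - 1)), String.ofList after.reverse)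

-- a 4-character suffix test is a test on the last-4 slice
theorem pv_endswith_iff_last4 (h tld : String) (hl : tld.toList.length = 4) :
    PySem.Str.endswith h tld = true ↔ PySem.Str.slice h (some (-4)) none = tld := by
  rw [PySem.Str.endswith_eq, PySem.Chars.endswith_iff, ← String.toList_inj]
  have hs : (PySem.Str.slice h (some (-4)) none).toList = h.toList.drop (h.toList.length - 4) := by
    rw [PySem.Str.toList_slice, PySem.Chars.slice_eq_listSlice,
        PySem.List.slice_from_neg_ofNat h.toList 4 (by omega)]
  rw [hs]
  constructor
  · rintro ⟨u, hu⟩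
    rw [← hu, show (u ++ tld.toList).length - 4 = u.length by simp [hl]]
    exact List.drop_left
  · intro he
    rw [← he]
    exact List.drop_suffix _ _

-- takeWhile basics
theorem pv_tw_mem {α : Type} (p : α → Bool) (l : List α) (i : Nat) (c : α)
    (hc : l[i]? = some c) (hi : i < (l.takeWhile p).length) : p c = true := by
  induction l generalizing i with
  | nil => simp at hc
  | cons a t ih =>
    by_cases hp : p a
    · cases i with
      | zero => simp_all
      | succ j =>
        simp only [List.takeWhile_cons, hp, if_pos] at hi
        simp only [List.getElem?_cons_succ] at hc
        exact ih j hc (by simpa using hi)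
    · simp [hp] at hi

theorem pv_tw_stop {α : Type} (p : α → Bool) (l : List α)
    (h : (l.takeWhile p).length < l.length) :
    ∃ c, l[(l.takeWhile p).length]? = some c ∧ p c = false := by
  induction l with
  | nil => simp at h
  | cons a t ih =>
    by_cases hp : p a
    · simp only [List.takeWhile_cons, hp, if_pos, List.length_cons] at h ⊢
      obtain ⟨c, hc, hpc⟩ := ih (by simpa using h)
      exact ⟨c, by simpa using hc, hpc⟩
    · exact ⟨a, by simp [hp], by simpa using hp⟩

-- unfolding equations for PySem.Chars.rfind.go
theorem pv_go_zero (cs : List Char) (sub : List Char) :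
    PySem.Chars.rfind.go cs sub 0 = if sub.isPrefixOf cs then 0 else -1 := by
  simp [PySem.Chars.rfind.go]

theorem pv_go_succ (cs sub : List Char) (j : Nat) :
    PySem.Chars.rfind.go cs sub (j+1) =
      if sub.isPrefixOf (cs.drop (j+1)) then ((j:Int)+1) else PySem.Chars.rfind.go cs sub j := by
  simp [PySem.Chars.rfind.go]

-- ['.'] is a prefix of cs.drop j exactly when position j holds a dot
theorem pv_pfx (cs : List Char) (j : Nat) :
    (['.'].isPrefixOf (cs.drop j)) = true ↔ cs[j]? = some '.' := by
  rw [List.isPrefixOf_iff_prefix]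
  have hd : (cs.drop j)[0]? = cs[j]? := by simp
  cases h : (cs.drop j) with
  | nil =>
    rw [h] at hd
    constructor <;> intro hh
    · simp [List.prefix_nil] at hh
    · simp [← hd] at hh
  | cons a t =>
    rw [h] at hd
    constructor <;> intro hh
    · rcases hh with ⟨u, hu⟩
      have ha : a = '.' := by
        have := congrArg (·[0]?) hu
        simpa using this.symm
      simp [← hd, ha]
    · have : a = '.' := by simp [← hd] at hh; exact hh
      exact ⟨t, by simp [this]⟩

-- rfind.go characterisations
theorem pv_go_none (cs : List Char) (n : Nat) (h : ∀ j, j ≤ n → cs[j]? ≠ some '.') :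
    PySem.Chars.rfind.go cs ['.'] n = -1 := by
  induction n with
  | zero =>
    rw [pv_go_zero]
    have : ¬ (['.'].isPrefixOf cs = true) := by
      rw [show cs = cs.drop 0 by simp, pv_pfx]; simpa using h 0 (le_refl 0)
    simp [this]
  | succ j ih =>
    rw [pv_go_succ]
    have : ¬ (['.'].isPrefixOf (cs.drop (j+1)) = true) := by
      rw [pv_pfx]; exact h (j+1) (le_refl _)
    simp [this]
    exact ih (fun k hk => h k (by omega))

theorem pv_go_top (cs : List Char) (n m : Nat) (hm : m ≤ n) (hdot : cs[m]? = some '.')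
    (hup : ∀ j, m < j → j ≤ n → cs[j]? ≠ some '.') :
    PySem.Chars.rfind.go cs ['.'] n = (m : Int) := by
  induction n with
  | zero =>
    interval_cases m
    rw [pv_go_zero]
    have : (['.'].isPrefixOf cs = true) := by
      rw [show cs = cs.drop 0 by simp, pv_pfx]; simpa using hdot
    simp [this]
  | succ j ih =>
    rw [pv_go_succ]
    by_cases hmj : m = j + 1
    · have : (['.'].isPrefixOf (cs.drop (j+1)) = true) := by rw [pv_pfx, ← hmj]; exact hdot
      simp [this, hmj]
    · have hm' : m ≤ j := by omega
      have : ¬ (['.'].isPrefixOf (cs.drop (j+1)) = true) := by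
        rw [pv_pfx]; exact hup (j+1) (by omega) (le_refl _)
      simp [this]
      exact ih hm' (fun k hk1 hk2 => hup k hk1 (by omega))

-- rfind s "." in terms of the length of the trailing run of non-dots
theorem pv_rfind_eq (s : String) :
    PySem.Str.rfind s "." =
      (if (s.toList.reverse.takeWhile (· ≠ '.')).length = s.toList.length then (-1 : Int)
       else ((s.toList.length : Int) - (s.toList.reverse.takeWhile (· ≠ '.')).length - 1)) := by
  have h1 : PySem.Str.rfind s "." = PySem.Chars.rfind.go s.toList ['.'] s.toList.length := by
    rw [PySem.Str.rfind_eq]; rfl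
  set cs := s.toList with hcs
  set k := (cs.reverse.takeWhile (· ≠ '.')).length with hk
  have hkle : k ≤ cs.length := by
    have := (List.takeWhile_prefix (l := cs.reverse) (· ≠ '.')).length_le
    rw [List.length_reverse] at this
    exact this
  have hnon : ∀ j, cs.length - k ≤ j → j ≤ cs.length → cs[j]? ≠ some '.' := by
    intro j hj1 hj2 hcon
    have hjlt : j < cs.length := by
      by_contra hge
      have : j = cs.length := by omega
      simp [this] at hcon
    have hi : cs.length - 1 - j < k := by omega
    have hrev : cs.reverse[cs.length - 1 - j]? = cs[j]? := by
      rw [List.getElem?_reverse (l := cs) (by omega)]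
      congr 1
      omega
    have := pv_tw_mem (· ≠ '.') cs.reverse (cs.length - 1 - j) '.' (by rw [hrev, hcon]) hi
    simp at this
  by_cases hkl : k = cs.length
  · rw [h1, pv_go_none cs cs.length (fun j hj2 => hnon j (by omega) hj2)]
    simp [hkl]
  · have hklt : k < cs.length := by omega
    obtain ⟨c, hc, hpc⟩ := pv_tw_stop (· ≠ '.') cs.reverse (by rw [List.length_reverse]; exact hklt)
    have hcdot : c = '.' := by simpa using hpc
    have hm : cs[cs.length - k - 1]? = some '.' := by
      rw [← hcdot]
      rw [List.getElem?_reverse (l := cs) (by omega)] at hc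
      convert hc using 2
      omega
    rw [h1, pv_go_top cs cs.length (cs.length - k - 1) (by omega) hm
        (fun j hj1 hj2 => hnon j (by omega) hj2)]
    simp [hkl]
    omega

-- A's rfind-based split of 'before' equals the rpartition-style split
theorem pv_body_eq (before tld : String) :
    (if PySem.Str.rfind before "." < 0 then (("" : String), before ++ tld)
     else ((PySem.Str.slice before none (some (PySem.Str.rfind before "."))),
           PySem.Str.slice before (some (PySem.Str.rfind before "." + 1)) none ++ tld))
    = ((pvRPartitionDot before).1, (pvRPartitionDot before).2 ++ tld) := by
  have hkle : (before.toList.reverse.takeWhile (· ≠ '.')).length ≤ before.toList.length := by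
    have := (List.takeWhile_prefix (l := before.toList.reverse) (· ≠ '.')).length_le
    rw [List.length_reverse] at this
    exact this
  have hrp : pvRPartitionDot before =
      (if (before.toList.reverse.takeWhile (· ≠ '.')).length = before.toList.length
       then ("", before)
       else (String.ofList (before.toList.take (before.toList.length - (before.toList.reverse.takeWhile (· ≠ '.')).length - 1)),
             String.ofList (before.toList.reverse.takeWhile (· ≠ '.')).reverse)) := rfl
  rw [pv_rfind_eq, hrp]
  by_cases hkl : (before.toList.reverse.takeWhile (· ≠ '.')).length = before.toList.length
  · rw [if_pos hkl, if_pos hkl, if_pos (show (-1:Int) < 0 by norm_num)]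
  · have hklt : (before.toList.reverse.takeWhile (· ≠ '.')).length < before.toList.length := by omega
    rw [if_neg hkl, if_neg hkl,
        if_neg (show ¬ ((before.toList.length : Int) - (before.toList.reverse.takeWhile (· ≠ '.')).length - 1 < 0) by omega)]
    have htake : before.toList.reverse.takeWhile (· ≠ '.') =
        before.toList.reverse.take (before.toList.reverse.takeWhile (· ≠ '.')).length := by
      exact List.prefix_iff_eq_take.mp (List.takeWhile_prefix _)
    refine Prod.ext ?_ ?_ <;> dsimp only
    · apply String.toList_inj.mp
      rw [PySem.Str.toList_slice, PySem.Chars.slice_eq_listSlice,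
          PySem.List.slice_to before.toList (by omega), String.toList_ofList]
      rw [show ((before.toList.length : Int) - (before.toList.reverse.takeWhile (· ≠ '.')).length - 1).toNat
            = before.toList.length - (before.toList.reverse.takeWhile (· ≠ '.')).length - 1 from by omega]
    · apply String.toList_inj.mp
      have h2 : (PySem.Str.slice before
            (some (((before.toList.length : Int) - (before.toList.reverse.takeWhile (· ≠ '.')).length - 1) + 1)) none).toList
          = (before.toList.reverse.takeWhile (· ≠ '.')).reverse := by
        rw [PySem.Str.toList_slice, PySem.Chars.slice_eq_listSlice,
            PySem.List.slice_from before.toList (by omega)]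
        conv_rhs => rw [htake]
        rw [List.take_reverse, List.reverse_reverse]
        rw [show (((before.toList.length : Int) - (before.toList.reverse.takeWhile (· ≠ '.')).length - 1) + 1).toNat
              = before.toList.length - (before.toList.reverse.takeWhile (· ≠ '.')).length from by omega]
      rw [String.toList_append, String.toList_append, String.toList_ofList, h2]

-- the TLD loop of A computed in rpartition form, for any list of 4-character TLDs
theorem pv_loop_eq (h : String) (l : List String) (hlen : ∀ t ∈ l, t.toList.length = 4) :
    pvALoop h l =
      (if PySem.Str.slice h (some (-4)) none ∈ l then
         ((pvRPartitionDot (PySem.Str.slice h none (some (-4)))).1,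
          (pvRPartitionDot (PySem.Str.slice h none (some (-4)))).2 ++ PySem.Str.slice h (some (-4)) none)
       else ("", "")) := by
  induction l with
  | nil => simp [pvALoop]
  | cons t rest ih =>
    have ht4 : t.toList.length = 4 := hlen t (by simp)
    by_cases he : PySem.Str.endswith h t = true
    · have hsl : PySem.Str.slice h (some (-4)) none = t := (pv_endswith_iff_last4 h t ht4).mp he
      have hlen' : (PySem.Str.len t : Int) = 4 := by
        rw [PySem.Str.len_eq]; exact_mod_cast ht4
      simp only [pvALoop, he, if_true, hlen']
      rw [if_pos (show PySem.Str.slice h (some (-4)) none ∈ t :: rest from by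
            rw [hsl]; exact List.mem_cons_self)]
      rw [hsl, pv_body_eq]
    · have hsl : PySem.Str.slice h (some (-4)) none ≠ t := by
        intro hc
        exact he ((pv_endswith_iff_last4 h t ht4).mpr hc)
      simp only [pvALoop, he, if_false, Bool.false_eq_true]
      rw [ih (fun u hu => hlen u (by simp [hu]))]
      simp [List.mem_cons, hsl]

-- ---- B-side: PySem's split on "." is Mathlib's splitOnP (· == '.') ----
theorem pv_mh_id (l : List (List Char)) : List.modifyHead (fun x => x) l = l := by
  cases l <;> rfl

theorem pv_go_split (fuel : Nat) (l cur : List Char) (acc : List (List Char))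
    (hf : l.length < fuel) :
    PySem.Chars.splitOn.go ['.'] fuel l cur acc
      = acc.reverse ++ (List.splitOnP (· == '.') l).modifyHead (cur.reverse ++ ·) := by
  induction fuel generalizing l cur acc with
  | zero => omega
  | succ f ih =>
    cases l with
    | nil => simp [PySem.Chars.splitOn.go, List.splitOnP_nil]
    | cons c rest =>
      by_cases hc : c = '.'
      · have hpf : List.isPrefixOf ['.'] (c :: rest) = true := by
          simp [List.isPrefixOf, hc]
        rw [show PySem.Chars.splitOn.go ['.'] (f+1) (c :: rest) cur acc
              = PySem.Chars.splitOn.go ['.'] f rest [] (cur.reverse :: acc) from by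
            simp [PySem.Chars.splitOn.go, hpf]]
        rw [ih _ _ _ (by simp at hf ⊢; omega)]
        rw [List.splitOnP_cons]
        simp only [hc, beq_self_eq_true, if_true, List.reverse_cons, List.modifyHead_cons,
          List.reverse_nil, List.nil_append, List.append_assoc, List.singleton_append,
          List.append_nil]
        rw [pv_mh_id]
      · have hpf : List.isPrefixOf ['.'] (c :: rest) = false := by
          simp [List.isPrefixOf, Ne.symm hc]
        rw [show PySem.Chars.splitOn.go ['.'] (f+1) (c :: rest) cur acc
              = PySem.Chars.splitOn.go ['.'] f rest (c :: cur) acc from by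
            simp [PySem.Chars.splitOn.go, hpf]]
        rw [ih _ _ _ (by simp at hf ⊢; omega)]
        rw [List.splitOnP_cons]
        simp only [hc, beq_iff_eq, if_false]
        rcases hsp : List.splitOnP (· == '.') rest with _ | ⟨x, xs⟩
        · exact absurd hsp (List.splitOnP_ne_nil _ rest)
        · simp [List.modifyHead]

theorem pv_splitOn_eq (cs : List Char) :
    PySem.Chars.splitOn cs ['.'] = List.splitOnP (· == '.') cs := by
  rw [show PySem.Chars.splitOn cs ['.']
        = PySem.Chars.splitOn.go ['.'] (cs.length + 1) cs [] [] from rfl]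
  rw [pv_go_split _ _ _ _ (by omega)]
  rcases hsp : List.splitOnP (· == '.') cs with _ | ⟨x, xs⟩
  · exact absurd hsp (List.splitOnP_ne_nil _ cs)
  · simp [List.modifyHead]

theorem pv_split_nodot (b : List Char) (hb : '.' ∉ b) :
    List.splitOnP (· == '.') b = [b] := by
  induction b with
  | nil => simp [List.splitOnP_nil]
  | cons c rest ih =>
    have hc : ¬ c = '.' := fun h => hb (by simp [h])
    rw [List.splitOnP_cons]
    simp only [hc, beq_iff_eq, if_false]
    rw [ih (fun h => hb (by simp [h]))]
    simp [List.modifyHead]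

theorem pv_split_last (a b : List Char) (hb : '.' ∉ b) :
    List.splitOnP (· == '.') (a ++ '.' :: b) = List.splitOnP (· == '.') a ++ [b] := by
  induction a with
  | nil => simp [List.splitOnP_cons, pv_split_nodot b hb, List.splitOnP_nil]
  | cons c rest ih =>
    by_cases hc : c = '.'
    · simp only [List.cons_append, List.splitOnP_cons, hc, beq_self_eq_true, if_true]
      rw [ih]
    · simp only [List.cons_append, List.splitOnP_cons, beq_iff_eq, hc, if_false]
      rw [ih]
      rcases hsp : List.splitOnP (· == '.') rest with _ | ⟨x, xs⟩
      · exact absurd hsp (List.splitOnP_ne_nil _ rest)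
      · simp [List.modifyHead]

-- decompose a dot-containing list around one dot with a dot-free tail
theorem pv_decomp (u : List Char) (hd : '.' ∈ u) :
    ∃ v w, u = v ++ '.' :: w ∧ '.' ∉ w := by
  induction u with
  | nil => simp at hd
  | cons c rest ih =>
    by_cases hr : '.' ∈ rest
    · obtain ⟨v, w, hvw, hw⟩ := ih hr
      exact ⟨c :: v, w, by rw [List.cons_append, ← hvw], hw⟩
    · have hc : c = '.' := by
        rcases List.mem_cons.mp hd with h | h
        · exact h.symm
        · exact absurd h hr
      exact ⟨[], rest, by rw [hc]; rfl, hr⟩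

-- pvRPartitionDot on a dot-free string
theorem pv_rp_nodot (u : List Char) (hu : '.' ∉ u) :
    pvRPartitionDot (String.ofList u) = ("", String.ofList u) := by
  unfold pvRPartitionDot
  simp only [String.toList_ofList]
  have : u.reverse.takeWhile (· ≠ '.') = u.reverse := by
    rw [List.takeWhile_eq_self_iff]
    intro c hc
    simp only [decide_eq_true_eq, ne_eq]
    intro h
    exact hu (by rw [← h]; exact List.mem_reverse.mp hc)
  rw [this]
  simp

-- pvRPartitionDot splits at the last dot
theorem pv_rp_dot (v w : List Char) (hw : '.' ∉ w) :
    pvRPartitionDot (String.ofList (v ++ '.' :: w)) = (String.ofList v, String.ofList w) := by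
  unfold pvRPartitionDot
  simp only [String.toList_ofList]
  have hrev : (v ++ '.' :: w).reverse = w.reverse ++ '.' :: v.reverse := by
    simp
  have htww : w.reverse.takeWhile (· ≠ '.') = w.reverse := by
    rw [List.takeWhile_eq_self_iff]
    intro c hc
    simp only [decide_eq_true_eq, ne_eq]
    intro h
    exact hw (by rw [← h]; exact List.mem_reverse.mp hc)
  have htw : (v ++ '.' :: w).reverse.takeWhile (· ≠ '.') = w.reverse := by
    rw [hrev, List.takeWhile_append, htww]
    simp
  rw [htw]
  have hlen : (v ++ '.' :: w).length = v.length + 1 + w.length := by simp; omega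
  rw [if_neg (by simp [hlen])]
  have htake : (v ++ '.' :: w).take ((v ++ '.' :: w).length - w.reverse.length - 1) = v := by
    rw [List.length_reverse, hlen, show v.length + 1 + w.length - w.length - 1 = v.length from by omega]
    exact List.take_left
  rw [htake]
  simp


-- labels[-1], labels[-2] and labels[:-2] on a list ending in two labels
theorem pv_get_pair_last (P : List String) (x y : String) :
    PySem.List.pyGetD (P ++ [x, y]) (-1) "" = y := by
  rw [PySem.List.pyGetD_neg_ofNat (P ++ [x, y]) 1 "" (by omega) (by simp)]
  rw [List.getElem_append_right (by simp)]
  have hl : (P ++ [x, y]).length - 1 - P.length = 1 := by simp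
  simp only [hl]
  rfl

theorem pv_get_pair_snd (P : List String) (x y : String) :
    PySem.List.pyGetD (P ++ [x, y]) (-2) "" = x := by
  rw [PySem.List.pyGetD_neg_ofNat (P ++ [x, y]) 2 "" (by omega) (by simp)]
  rw [List.getElem_append_right (by simp)]
  have hl : (P ++ [x, y]).length - 2 - P.length = 0 := by simp
  simp only [hl]
  rfl

theorem pv_slice_pair (P : List String) (x y : String) :
    PySem.List.slice (P ++ [x, y]) none (some (-2)) = P := by
  rw [PySem.List.slice_to_neg_ofNat _ 2 (by omega)]
  have hl : (P ++ [x, y]).length - 2 = P.length := by simp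
  rw [hl]
  exact List.take_left

theorem pv_map_toList_ofList (X : List (List Char)) :
    (X.map String.ofList).map String.toList = X := by
  rw [List.map_map,
      show String.toList ∘ String.ofList = (id : List Char → List Char) from
        funext (fun l => String.toList_ofList)]
  exact List.map_id X

-- B's label-based reassembly, for a host of the shape u ++ "." ++ lab with lab dot-free:
-- it equals the rpartition form that pv_loop_eq gives for A
theorem pv_core (h : String) (u lab : List Char)
    (hcs : h.toList = u ++ '.' :: lab)
    (hnd : '.' ∉ lab)
    (hmem : String.ofList lab ∈ pvTLDLabels) :
    split_host_py_alt h =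
      ((pvRPartitionDot (String.ofList u)).1,
       (pvRPartitionDot (String.ofList u)).2 ++ String.ofList ('.' :: lab)) := by
  have hnl : h ≠ "localhost" := by
    intro hc
    have : '.' ∈ h.toList := by rw [hcs]; simp
    rw [hc] at this
    revert this
    decide
  -- the label list B computes
  have hch : PySem.Chars.split? h.toList ".".toList
      = some (List.splitOnP (· == '.') h.toList) := by
    rw [show (".".toList) = ['.'] from rfl,
        show PySem.Chars.split? h.toList ['.']
          = some (PySem.Chars.splitOn h.toList ['.']) from by simp [PySem.Chars.split?],
        pv_splitOn_eq]
  have hmapS := PySem.Str.split?_map h "."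
  rw [hch] at hmapS
  rcases hS : PySem.Str.split? h "." with _ | L
  · rw [hS] at hmapS; simp at hmapS
  · rw [hS] at hmapS
    simp only [Option.map_some, Option.some_inj] at hmapS
    have hL : L = (List.splitOnP (· == '.') h.toList).map String.ofList := by
      rw [← hmapS, List.map_map]
      conv_lhs => rw [show L = L.map id from (List.map_id L).symm]
      apply List.map_congr_left
      intro s _
      exact String.ofList_toList.symm
    unfold split_host_py_alt
    rw [if_neg hnl, hS]
    simp only [Option.getD_some]
    by_cases hdu : '.' ∈ u
    · -- u itself contains a dot: split it at its last dot
      obtain ⟨v, w, hvw, hw⟩ := pv_decomp u hdu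
      have hKu : List.splitOnP (· == '.') u = List.splitOnP (· == '.') v ++ [w] := by
        rw [hvw]; exact pv_split_last v w hw
      have hLval : L = (List.splitOnP (· == '.') v).map String.ofList
          ++ [String.ofList w, String.ofList lab] := by
        rw [hL, hcs, pv_split_last u lab hnd, hKu]
        simp
      subst hLval
      set P := (List.splitOnP (· == '.') v).map String.ofList with hP
      rw [if_pos (by
        refine ⟨by simp, ?_⟩
        rw [pv_get_pair_last]
        exact hmem)]
      rw [pv_slice_pair, pv_get_pair_last, pv_get_pair_snd, hvw, pv_rp_dot v w hw]
      refine Prod.ext ?_ ?_ <;> dsimp only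
      · -- ".".join(labels[:-2]) = v
        apply String.toList_inj.mp
        rw [PySem.Str.toList_join, hP, pv_map_toList_ofList]
        simp only [PySem.Chars.join, String.toList_ofList]
        exact List.intercalate_splitOn v '.'
      · apply String.toList_inj.mp
        simp [String.toList_append, String.toList_ofList]
    · -- no dot in u: B's join is empty, the hostname is u itself
      have hKu : List.splitOnP (· == '.') u = [u] := pv_split_nodot u hdu
      have hLval : L = [] ++ [String.ofList u, String.ofList lab] := by
        rw [hL, hcs, pv_split_last u lab hnd, hKu]
        simp
      subst hLval
      rw [if_pos (by
        refine ⟨by simp, ?_⟩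
        rw [pv_get_pair_last]
        exact hmem)]
      rw [pv_slice_pair, pv_get_pair_last, pv_get_pair_snd, pv_rp_nodot u hdu]
      refine Prod.ext ?_ ?_ <;> dsimp only
      · apply String.toList_inj.mp
        rw [PySem.Str.toList_join]
        rfl
      · apply String.toList_inj.mp
        simp [String.toList_append, String.toList_ofList]

-- the finish: from 'the last-4 slice is the TLD t' to the claimed equality
theorem pv_finish (h t : String) (hsl : PySem.Str.slice h (some (-4)) none = t)
    (h4 : t.toList.length = 4) (hhead : t.toList.head? = some '.')
    (hnd : '.' ∉ t.toList.tail) (hmem : String.ofList t.toList.tail ∈ pvTLDLabels) :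
    split_host_py_alt h =
      ((pvRPartitionDot (PySem.Str.slice h none (some (-4)))).1,
       (pvRPartitionDot (PySem.Str.slice h none (some (-4)))).2
         ++ PySem.Str.slice h (some (-4)) none) := by
  have hdrop : h.toList.drop (h.toList.length - 4) = t.toList := by
    rw [← hsl, PySem.Str.toList_slice, PySem.Chars.slice_eq_listSlice,
        PySem.List.slice_from_neg_ofNat h.toList 4 (by omega)]
  have hlen4 : 4 ≤ h.toList.length := by
    by_contra hlt
    have := congrArg List.length hdrop
    rw [List.length_drop, h4] at this
    omega
  have htl : t.toList = '.' :: t.toList.tail := by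
    rcases ht : t.toList with _ | ⟨c, tl⟩
    · rw [ht] at hhead; simp at hhead
    · rw [ht] at hhead
      simp only [List.head?_cons, Option.some_inj] at hhead
      rw [hhead]
      rfl
  have hcs : h.toList = h.toList.take (h.toList.length - 4) ++ '.' :: t.toList.tail := by
    rw [← htl, ← hdrop, List.take_append_drop]
  have hbef : PySem.Str.slice h none (some (-4))
      = String.ofList (h.toList.take (h.toList.length - 4)) := by
    apply String.toList_inj.mp
    rw [PySem.Str.toList_slice, PySem.Chars.slice_eq_listSlice,
        PySem.List.slice_to_neg_ofNat h.toList 4 (by omega), String.toList_ofList]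
  have htld : PySem.Str.slice h (some (-4)) none = String.ofList ('.' :: t.toList.tail) := by
    rw [hsl]
    apply String.toList_inj.mp
    rw [String.toList_ofList]
    exact htl
  rw [hbef, htld]
  exact pv_core h (h.toList.take (h.toList.length - 4)) t.toList.tail hcs hnd hmem

-- ===== VERDICT (by name: the statement is the Claim_ definition above) =====
theorem split_host_py_spec : Claim_equal_split_host_py := by
  intro h _ hpre
  unfold Spec_split_host_py split_host_py
  by_cases hl : h = "localhost"
  · rw [if_pos hl, hl]
    rfl
  · rcases hpre with hpre | hin
    · exact absurd hpre hl
    · rw [if_neg hl, pv_loop_eq h pvTLDs (by decide), if_pos hin]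
      have := hin
      simp only [pvTLDs, List.mem_cons, List.not_mem_nil, or_false] at this
      rcases this with hc | hc | hc | hc | hc | hc | hc <;>
        exact (pv_finish h _ hc (by decide) (by decide) (by decide) (by decide)).symm
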